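-- pv_equiv track=rewrite | github.com/akshatakat-blip/display-video-platform | display-video/api/api/validators/ad_validator.py | substitute_macros
-- ===== SOURCE A (Python) =====
-- MACRO_ALLOWLIST = [
--     "%%CLICK_URL_UNESC%%", "%%CLICK_URL_ESC%%", "%%CACHEBUSTER%%",
--     "%%DEST_URL%%", "%%DEST_URL_ESC%%", "%%SESSION_ID%%", "%%SITE%%",
--     "%%AD_ID%%", "%%CAMPAIGN_ID%%", "%%PLACEMENT_ID%%",
-- ]
--
-- def substitute_macros(text: str) -> str:
--     """Replace only allowlisted macros with placeholder (demo)."""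
--     out = text
--     for macro in MACRO_ALLOWLIST:
--         # Demo: replace with a placeholder value
--         if macro == "%%CACHEBUSTER%%":
--             out = out.replace(macro, "123456789")
--         elif macro == "%%CLICK_URL_ESC%%":
--             out = out.replace(macro, "https%3A%2F%2Fexample.com%2Fclick")
--         elif macro == "%%CLICK_URL_UNESC%%":
--             out = out.replace(macro, "https://example.com/click")
--         else:
--             out = out.replace(macro, "demo_value")
--     return out
-- ===== SOURCE B (Python) =====
-- MACRO_ALLOWLIST = [
--     "%%CLICK_URL_UNESC%%", "%%CLICK_URL_ESC%%", "%%CACHEBUSTER%%",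
--     "%%DEST_URL%%", "%%DEST_URL_ESC%%", "%%SESSION_ID%%", "%%SITE%%",
--     "%%AD_ID%%", "%%CAMPAIGN_ID%%", "%%PLACEMENT_ID%%",
-- ]
--
-- _PLACEHOLDERS = {
--     "%%CACHEBUSTER%%": "123456789",
--     "%%CLICK_URL_ESC%%": "https%3A%2F%2Fexample.com%2Fclick",
--     "%%CLICK_URL_UNESC%%": "https://example.com/click",
-- }
--
--
-- def substitute_macros(text: str) -> str:
--     """Replace only allowlisted macros with placeholder (demo)."""
--     def go(s, macros):
--         if not macros:
--             return s
--         macro = macros[0]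
--         value = _PLACEHOLDERS.get(macro, "demo_value")
--         return go(value.join(s.split(macro)), macros[1:])
--     return go(text, MACRO_ALLOWLIST)
-- ===== Notes on version B (the rewrite author's own statement) =====
-- stated objective: alternative
-- what changed: B replaces A's hard-coded if/elif dispatch plus str.replace loop with a placeholder lookup table and a recursion over the macro list that substitutes each macro via the value.join(text.split(macro)) idiom.
import Mathlib
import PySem

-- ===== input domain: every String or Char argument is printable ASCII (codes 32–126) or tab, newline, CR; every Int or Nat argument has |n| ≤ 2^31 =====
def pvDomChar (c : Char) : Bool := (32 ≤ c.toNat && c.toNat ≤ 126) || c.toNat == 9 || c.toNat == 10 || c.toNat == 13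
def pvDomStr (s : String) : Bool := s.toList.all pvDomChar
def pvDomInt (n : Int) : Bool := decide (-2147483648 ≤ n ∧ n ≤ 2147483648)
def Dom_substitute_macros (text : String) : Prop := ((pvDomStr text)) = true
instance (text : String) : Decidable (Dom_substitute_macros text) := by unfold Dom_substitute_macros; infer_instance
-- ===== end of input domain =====

-- B replaces A's if/elif dispatch + str.replace loop by a placeholder table and a recursion
-- over the mac list using the value.join(s.split(mac)) idiom; same cost, different decomposition.

-- ===== PORT A =====
def MACRO_ALLOWLIST : List String :=
  ["%%CLICK_URL_UNESC%%", "%%CLICK_URL_ESC%%", "%%CACHEBUSTER%%",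
   "%%DEST_URL%%", "%%DEST_URL_ESC%%", "%%SESSION_ID%%", "%%SITE%%",
   "%%AD_ID%%", "%%CAMPAIGN_ID%%", "%%PLACEMENT_ID%%"]

def substitute_macros (text : String) : String :=
  MACRO_ALLOWLIST.foldl (fun out mac =>
    if mac = "%%CACHEBUSTER%%" then
      PySem.Str.replace out mac "123456789"
    else if mac = "%%CLICK_URL_ESC%%" then
      PySem.Str.replace out mac "https%3A%2F%2Fexample.com%2Fclick"
    else if mac = "%%CLICK_URL_UNESC%%" then
      PySem.Str.replace out mac "https://example.com/click"
    else
      PySem.Str.replace out mac "demo_value") text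

-- ===== PORT B =====
def PLACEHOLDERS : PySem.Dict String String := PySem.Dict.ofList
  [("%%CACHEBUSTER%%", "123456789"),
   ("%%CLICK_URL_ESC%%", "https%3A%2F%2Fexample.com%2Fclick"),
   ("%%CLICK_URL_UNESC%%", "https://example.com/click")]

-- Source B's inner recursion go(s, macros); the '.getD []' only totalises s.split(mac)
-- (every mac in the list is a nonempty literal, so split? never returns none).
def subMacrosGo (s : String) (macros : List String) : String :=
  match macros with
  | [] => s
  | mac :: rest =>
      subMacrosGo
        (PySem.Str.join (PySem.Dict.getD PLACEHOLDERS mac "demo_value")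
          ((PySem.Str.split? s mac).getD [])) rest

def substitute_macros_alt (text : String) : String :=
  subMacrosGo text MACRO_ALLOWLIST

-- ===== PRECONDITION & SPEC =====
def Spec_substitute_macros (text : String) (out : String) : Prop := out = substitute_macros_alt text
instance (text : String) (out : String) : Decidable (Spec_substitute_macros text out) := by unfold Spec_substitute_macros; infer_instance

-- ===== CLAIM (what is proved, stated in full; the proofs are below) =====
def Claim_equal_substitute_macros : Prop := ∀ (text : String), Dom_substitute_macros text → Spec_substitute_macros text (substitute_macros text)

-- ===== LEMMAS AND PROOFS =====

-- join with the separator inserted, last piece appended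
theorem pvJoin_append_last (new p : List Char) (ps : List (List Char)) :
    PySem.Chars.join new (ps ++ [p]) = (ps.map (· ++ new)).flatten ++ p := by
  induction ps with
  | nil => simp [PySem.Chars.join_singleton]
  | cons q ps ih =>
      rcases hE : ps ++ [p] with _ | ⟨r, rest⟩
      · simp at hE
      · rw [List.cons_append, hE, PySem.Chars.join_cons_cons, ← hE, ih]
        simp

-- the two fuel-indexed scanners agree: replace's accumulator is the join of splitOn's pieces
theorem pvGo_eq (old new : List Char) (hold : old ≠ []) :
    ∀ f1 f2 (l cur : List Char) (acc : List (List Char)) (racc : List Char),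
      l.length ≤ f1 → l.length ≤ f2 →
      racc.reverse = (acc.reverse.map (· ++ new)).flatten ++ cur.reverse →
      PySem.Chars.replace.go old new f1 l racc
        = PySem.Chars.join new (PySem.Chars.splitOn.go old f2 l cur acc) := by
  intro f1
  induction f1 with
  | zero =>
      intro f2 l cur acc racc h1 h2 h3
      have hl : l = [] := List.eq_nil_of_length_eq_zero (Nat.le_zero.mp h1)
      subst hl
      have hs : PySem.Chars.splitOn.go old f2 [] cur acc = (cur.reverse :: acc).reverse := by
        cases f2 <;> simp [PySem.Chars.splitOn.go]
      have hr : PySem.Chars.replace.go old new 0 [] racc = racc.reverse := by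
        simp [PySem.Chars.replace.go]
      rw [hr, hs, List.reverse_cons, pvJoin_append_last]
      simpa using h3
  | succ f ih =>
      intro f2 l cur acc racc h1 h2 h3
      cases l with
      | nil =>
          have hs : PySem.Chars.splitOn.go old f2 [] cur acc = (cur.reverse :: acc).reverse := by
            cases f2 <;> simp [PySem.Chars.splitOn.go]
          have hr : PySem.Chars.replace.go old new (f + 1) [] racc = racc.reverse := by
            simp [PySem.Chars.replace.go]
          rw [hr, hs, List.reverse_cons, pvJoin_append_last]
          simpa using h3
      | cons c t =>
          cases f2 with
          | zero => simp at h2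
          | succ f2' =>
              by_cases hp : old.isPrefixOf (c :: t)
              · rw [show PySem.Chars.replace.go old new (f + 1) (c :: t) racc
                      = PySem.Chars.replace.go old new f ((c :: t).drop old.length) (new.reverse ++ racc) by
                      simp [PySem.Chars.replace.go, hp],
                    show PySem.Chars.splitOn.go old (f2' + 1) (c :: t) cur acc
                      = PySem.Chars.splitOn.go old f2' ((c :: t).drop old.length) [] (cur.reverse :: acc) by
                      simp [PySem.Chars.splitOn.go, hp]]
                have hlen : 1 ≤ old.length := by
                  cases old with
                  | nil => exact absurd rfl hold
                  | cons _ _ => simp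
                refine ih f2' _ _ _ _ ?_ ?_ ?_
                · have := List.length_drop (l := c :: t) (i := old.length)
                  simp only [this, List.length_cons] at *
                  omega
                · have := List.length_drop (l := c :: t) (i := old.length)
                  simp only [this, List.length_cons] at *
                  omega
                · simp [h3, List.flatten_append, List.append_assoc]
              · rw [show PySem.Chars.replace.go old new (f + 1) (c :: t) racc
                      = PySem.Chars.replace.go old new f t (c :: racc) by
                      simp [PySem.Chars.replace.go, hp],
                    show PySem.Chars.splitOn.go old (f2' + 1) (c :: t) cur acc
                      = PySem.Chars.splitOn.go old f2' t (c :: cur) acc by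
                      simp [PySem.Chars.splitOn.go, hp]]
                refine ih f2' _ _ _ _ ?_ ?_ ?_
                · simp at h1 ⊢; omega
                · simp at h2 ⊢; omega
                · simp [h3, List.append_assoc]


theorem pvReplace_eq_join_split (s old new : List Char) (h : old ≠ []) :
    PySem.Chars.replace s old new = PySem.Chars.join new (PySem.Chars.splitOn s old) := by
  unfold PySem.Chars.replace PySem.Chars.splitOn
  rw [if_neg (by simpa [List.isEmpty_iff] using h)]
  exact pvGo_eq old new h s.length (s.length + 1) s [] [] [] (le_refl _) (by omega) (by simp)

theorem pvStr_replace_eq (s old new : String) (h : old.toList ≠ []) :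
    PySem.Str.replace s old new
      = PySem.Str.join new ((PySem.Str.split? s old).getD []) := by
  unfold PySem.Str.replace PySem.Str.join PySem.Str.split? PySem.Chars.split?
  rw [if_neg (by simpa [List.isEmpty_iff] using h)]
  simp only [Option.map_some, Option.getD_some, List.map_map]
  simp only [Function.comp_def, String.toList_ofList, List.map_id']
  rw [pvReplace_eq_join_split _ _ _ h]

theorem pvSubGo_foldl (macros : List String) (s : String) :
    subMacrosGo s macros
      = macros.foldl (fun out mac =>
          PySem.Str.join (PySem.Dict.getD PLACEHOLDERS mac "demo_value")
            ((PySem.Str.split? out mac).getD [])) s := by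
  induction macros generalizing s with
  | nil => rfl
  | cons m rest ih => simp [subMacrosGo, ih]

theorem pvPH_hit1 : PySem.Dict.getD PLACEHOLDERS "%%CACHEBUSTER%%" "demo_value" = "123456789" := rfl
theorem pvPH_hit2 : PySem.Dict.getD PLACEHOLDERS "%%CLICK_URL_ESC%%" "demo_value" = "https%3A%2F%2Fexample.com%2Fclick" := rfl
theorem pvPH_hit3 : PySem.Dict.getD PLACEHOLDERS "%%CLICK_URL_UNESC%%" "demo_value" = "https://example.com/click" := rfl
theorem pvPH_miss1 : PySem.Dict.getD PLACEHOLDERS "%%DEST_URL%%" "demo_value" = "demo_value" := rfl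
theorem pvPH_miss2 : PySem.Dict.getD PLACEHOLDERS "%%DEST_URL_ESC%%" "demo_value" = "demo_value" := rfl
theorem pvPH_miss3 : PySem.Dict.getD PLACEHOLDERS "%%SESSION_ID%%" "demo_value" = "demo_value" := rfl
theorem pvPH_miss4 : PySem.Dict.getD PLACEHOLDERS "%%SITE%%" "demo_value" = "demo_value" := rfl
theorem pvPH_miss5 : PySem.Dict.getD PLACEHOLDERS "%%AD_ID%%" "demo_value" = "demo_value" := rfl
theorem pvPH_miss6 : PySem.Dict.getD PLACEHOLDERS "%%CAMPAIGN_ID%%" "demo_value" = "demo_value" := rfl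
theorem pvPH_miss7 : PySem.Dict.getD PLACEHOLDERS "%%PLACEMENT_ID%%" "demo_value" = "demo_value" := rfl

-- ===== VERDICT (by name: the statement is the Claim_ definition above) =====
theorem substitute_macros_spec : Claim_equal_substitute_macros := by
  intro text _
  unfold Spec_substitute_macros substitute_macros substitute_macros_alt
  rw [pvSubGo_foldl]
  refine (PySem.List.foldl_congr_mem _ _ _ _ ?_).symm
  intro acc x hx
  simp only [MACRO_ALLOWLIST, List.mem_cons, List.not_mem_nil, or_false] at hx
  rcases hx with rfl | rfl | rfl | rfl | rfl | rfl | rfl | rfl | rfl | rfl <;>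
    simp only [String.reduceEq, if_true, if_false, pvPH_hit1, pvPH_hit2, pvPH_hit3,
      pvPH_miss1, pvPH_miss2, pvPH_miss3, pvPH_miss4, pvPH_miss5, pvPH_miss6, pvPH_miss7] <;>
    (refine (pvStr_replace_eq _ _ _ ?_).symm) <;> decide
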